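-- pv_equiv track=rewrite | github.com/volcengine/verl | atropos/environments/intern_bootcamp/internbootcamp_lib/internbootcamp/bootcamp/e2chiorianddollpickinghardversion/e2chiorianddollpickinghardversion.py | build_linear_basis
-- ===== SOURCE A (Python) =====
-- def build_linear_basis(a_list, m):
--     basis = [0] * m
--     for x in a_list:
--         if x == 0:
--             continue
--         for i in reversed(range(m)):  # 固定从高位到低位处理
--             if (x >> i) & 1:
--                 if basis[i]:
--                     x ^= basis[i]
--                 else:
--                     basis[i] = x
--                     # 消去低位
--                     for j in reversed(range(i)):
--                         if (basis[i] >> j) & 1: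
--                             basis[i] ^= basis[j]
--                     # 消去高位
--                     for j in range(i+1, m):
--                         if (basis[j] >> i) & 1:
--                             basis[j] ^= basis[i]
--                     break
--     non_zero = [b for b in basis if b != 0]
--     return non_zero, basis
-- ===== SOURCE B (Python) =====
-- def build_linear_basis(a_list, m):
--     basis = [0] * m
--     # Stage 1: plain row-echelon (triangular) insertion -- no elimination at all.
--     for x in a_list:
--         for i in reversed(range(m)):
--             if (x >> i) & 1:
--                 if basis[i]:
--                     x ^= basis[i]
--                 else:
--                     basis[i] = x
--                     break
--     # Stage 2: one back-substitution sweep, rows taken bottom-up, so each row is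
--     # reduced against the already fully-reduced lower rows; this yields the RREF,
--     # which is unique, hence identical to A's eagerly maintained array.
--     for i in range(m):
--         if basis[i]:
--             for j in reversed(range(i)):
--                 if (basis[i] >> j) & 1 and basis[j]:
--                     basis[i] ^= basis[j]
--     non_zero = [b for b in basis if b != 0]
--     return non_zero, basis
-- ===== Notes on version B (the rewrite author's own statement) =====
-- stated objective: alternative
-- what changed: A is a single pass that keeps the basis fully reduced at every moment (each insertion immediately clears low bits of the new row and the new pivot bit from all higher rows); B is staged: a first pass builds only an unreduced triangular (row-echelon) basis with no elimination, then one separate bottom-up back-substitution sweep reduces each row against the already-clean lower rows, relying on uniqueness of the GF(2) reduced echelon form.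
import Mathlib
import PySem

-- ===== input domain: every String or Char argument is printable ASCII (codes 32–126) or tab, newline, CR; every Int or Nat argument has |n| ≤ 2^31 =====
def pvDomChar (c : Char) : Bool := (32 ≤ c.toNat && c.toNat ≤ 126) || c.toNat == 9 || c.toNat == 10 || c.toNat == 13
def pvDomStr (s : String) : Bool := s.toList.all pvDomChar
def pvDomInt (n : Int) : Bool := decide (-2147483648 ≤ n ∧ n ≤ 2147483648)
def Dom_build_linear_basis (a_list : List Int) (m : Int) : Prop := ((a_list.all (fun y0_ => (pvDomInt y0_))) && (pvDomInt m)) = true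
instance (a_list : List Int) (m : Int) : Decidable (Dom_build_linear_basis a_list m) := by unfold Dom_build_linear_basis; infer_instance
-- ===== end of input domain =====

-- A maintains a fully reduced (RREF) basis inside one pass; B is staged: a first pass builds an
-- unreduced triangular basis, then one bottom-up back-substitution sweep produces the same RREF
-- (objective: alternative; same cost, no speed claim).

-- `(x >> i) & 1` of Python, as a Bool test (== 1)
def pvBit (x : Int) (i : Nat) : Bool := PySem.Int.band (x >>> i) 1 == 1

-- ===== PORT A =====
-- A's `消去低位` loop: j runs over the given (descending) index list; the accumulator is basis[i]
def pvLowA (basis : List Int) : Int → List Nat → Int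
  | v, [] => v
  | v, j :: rest => pvLowA basis (if pvBit v j then PySem.Int.bxor v (basis.getD j 0) else v) rest

-- A's `消去高位` loop: for each j in the (ascending) index list, basis[j] ^= basis[i] when bit i of
-- basis[j] is set; basis[i] is re-read each step
def pvHighClear (i : Nat) : List Int → List Nat → List Int
  | basis, [] => basis
  | basis, j :: rest =>
      pvHighClear i
        (if pvBit (basis.getD j 0) i then basis.set j (PySem.Int.bxor (basis.getD j 0) (basis.getD i 0)) else basis)
        rest

-- A's inner `for i in reversed(range(m))` with its break: indices are given as a descending list
def pvScanA (M : Nat) : List Int → Int → List Nat → List Int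
  | basis, _, [] => basis
  | basis, x, i :: rest =>
    if pvBit x i then
      if basis.getD i 0 ≠ 0 then pvScanA M basis (PySem.Int.bxor x (basis.getD i 0)) rest
      else
        let b1 := basis.set i x
        let b2 := b1.set i (pvLowA b1 (b1.getD i 0) (List.range i).reverse)
        pvHighClear i b2 (List.range' (i + 1) (M - (i + 1)))   -- break
    else pvScanA M basis x rest

def build_linear_basis (a_list : List Int) (m : Int) : List Int × List Int :=
  let M := m.toNat                     -- `[0] * m` and `range(m)` are empty for m ≤ 0
  let basis := a_list.foldl
    (fun b x => if x == 0 then b else pvScanA M b x (List.range M).reverse)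
    (List.replicate M 0)
  (basis.filter (fun b => b ≠ 0), basis)

-- ===== PORT B =====
-- Stage 1: plain triangular insertion with break — no elimination at all
def pvScanT : List Int → Int → List Nat → List Int
  | b, _, [] => b
  | b, x, i :: rest =>
    if pvBit x i then
      if b.getD i 0 ≠ 0 then pvScanT b (PySem.Int.bxor x (b.getD i 0)) rest
      else b.set i x        -- break
    else pvScanT b x rest

-- B's stage-2 inner loop: reduce the accumulator against the rows at the given (descending) indices
def pvReduceB (basis : List Int) : Int → List Nat → Int
  | x, [] => x
  | x, i :: rest =>
      pvReduceB basis (if pvBit x i && (basis.getD i 0 != 0) then PySem.Int.bxor x (basis.getD i 0) else x) rest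

-- Stage 2: bottom-up back-substitution sweep over the rows (ascending index list)
def pvSweep : List Int → List Nat → List Int
  | b, [] => b
  | b, i :: rest =>
      pvSweep (if b.getD i 0 ≠ 0 then b.set i (pvReduceB b (b.getD i 0) (List.range i).reverse) else b) rest

def build_linear_basis_alt (a_list : List Int) (m : Int) : List Int × List Int :=
  let M := m.toNat
  let tri := a_list.foldl (fun b x => pvScanT b x (List.range M).reverse) (List.replicate M 0)
  let basis := pvSweep tri (List.range M)
  (basis.filter (fun b => b ≠ 0), basis)

-- ===== PRECONDITION & SPEC =====
def Spec_build_linear_basis (a_list : List Int) (m : Int) (out : List Int × List Int) : Prop := out = build_linear_basis_alt a_list m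
instance (a_list : List Int) (m : Int) (out : List Int × List Int) : Decidable (Spec_build_linear_basis a_list m out) := by unfold Spec_build_linear_basis; infer_instance

-- ===== CLAIM (what is proved, stated in full; the proofs are below) =====
def Claim_equal_build_linear_basis : Prop := ∀ (a_list : List Int) (m : Int), Dom_build_linear_basis a_list m → Spec_build_linear_basis a_list m (build_linear_basis a_list m)

-- ===== LEMMAS AND PROOFS =====

theorem pvBxor_eq_xor (a b : Int) : PySem.Int.bxor a b = Int.xor a b := by
  cases a with
  | ofNat m =>
    cases b with
    | ofNat n =>
        show PySem.Int.bxor (m:Int) (n:Int) = ((m ^^^ n : Nat) : Int)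
        rw [PySem.Int.bxor]; simp
    | negSucc n =>
        show PySem.Int.bxor (m:Int) (Int.negSucc n) = Int.negSucc (m ^^^ n)
        rw [PySem.Int.bxor]
        simp [Int.negSucc_eq]; omega
  | negSucc m =>
    cases b with
    | ofNat n =>
        show PySem.Int.bxor (Int.negSucc m) (n:Int) = Int.negSucc (m ^^^ n)
        rw [PySem.Int.bxor]
        simp [Int.negSucc_eq]; omega
    | negSucc n =>
        show PySem.Int.bxor (Int.negSucc m) (Int.negSucc n) = ((m ^^^ n : Nat) : Int)
        rw [PySem.Int.bxor]
        have h1 : ¬ (0:Int) ≤ Int.negSucc m := by omega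
        have h1' : ¬ (0:Int) ≤ Int.negSucc n := by omega
        simp [h1, h1']

theorem pvBit_eq_testBit (x : Int) (i : Nat) : pvBit x i = x.testBit i := by
  rw [pvBit, PySem.Int.band_one, PySem.Int.mod_eq_emod_of_pos (by norm_num)]
  cases x with
  | ofNat m =>
      show ((Int.ofNat (m >>> i)) % 2 == 1) = _
      simp only [Int.testBit, Nat.testBit, Nat.one_and_eq_mod_two, Nat.mod_two_bne_zero,
        Int.ofNat_eq_natCast, beq_eq_beq]
      omega
  | negSucc m =>
      show ((Int.negSucc (m >>> i)) % 2 == 1) = _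
      have hrhs : (Int.negSucc m).testBit i = !(Nat.testBit m i) := rfl
      have hk : Nat.testBit m i = decide ((m >>> i) % 2 = 1) := by
        simp [Nat.testBit, Nat.one_and_eq_mod_two]
      rw [hrhs, hk]
      generalize m >>> i = k
      rw [Int.negSucc_eq]
      rcases (by omega : k % 2 = 0 ∨ k % 2 = 1) with h | h <;> simp [h] <;> omega

theorem pvBit_bxor (a b : Int) (i : Nat) :
    pvBit (PySem.Int.bxor a b) i = xor (pvBit a i) (pvBit b i) := by
  simp [pvBit_eq_testBit, pvBxor_eq_xor, Int.testBit_lxor]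

theorem pvBit_zero (i : Nat) : pvBit 0 i = false := by
  simp [pvBit_eq_testBit, Int.testBit]

theorem pvBxor_comm (a b : Int) : PySem.Int.bxor a b = PySem.Int.bxor b a := by
  rw [pvBxor_eq_xor, pvBxor_eq_xor]
  cases a <;> cases b <;> simp [Int.xor, Nat.xor_comm]

theorem pvBxor_assoc (a b c : Int) :
    PySem.Int.bxor (PySem.Int.bxor a b) c = PySem.Int.bxor a (PySem.Int.bxor b c) := by
  simp only [pvBxor_eq_xor]
  cases a <;> cases b <;> cases c <;> simp [Int.xor, Nat.xor_assoc]

theorem pvBxor_self (a : Int) : PySem.Int.bxor a a = 0 := by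
  rw [pvBxor_eq_xor]
  cases a <;> simp [Int.xor]

theorem pvBxor_zero (a : Int) : PySem.Int.bxor a 0 = a := by
  rw [pvBxor_eq_xor]
  cases a <;> simp [Int.xor]

theorem pvBit_ne_zero (x : Int) (i : Nat) (h : pvBit x i = true) : x ≠ 0 := by
  intro h0; rw [h0, pvBit_zero] at h; exact absurd h (by simp)

theorem pvGetD_set_ne (l : List Int) (i j : Nat) (v : Int) (h : i ≠ j) :
    (l.set i v).getD j 0 = l.getD j 0 := by
  simp [List.getD, List.getElem?_set_ne h]

theorem pvGetD_set_self (l : List Int) (i : Nat) (v : Int) (h : i < l.length) :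
    (l.set i v).getD i 0 = v := by
  simp [List.getD, h]

-- step lemmas for descending/ascending ranges
theorem pvRangeRev_succ (n : Nat) : (List.range (n + 1)).reverse = n :: (List.range n).reverse := by
  simp [List.range_succ]

theorem pvAndCond (c : Bool) (v : Int) : (c && (v != 0)) = true ↔ c = true ∧ v ≠ 0 := by
  cases c <;> simp

-- the triangular-row invariant: every stored nonzero basis[k] has bit k set and no set bit in (k, M)
def pvInv (M : Nat) (basis : List Int) : Prop :=
  basis.length = M ∧ ∀ k, k < M → basis.getD k 0 ≠ 0 →
    pvBit (basis.getD k 0) k = true ∧ ∀ j, k < j → j < M → pvBit (basis.getD k 0) j = false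

-- the stronger RREF invariant A maintains: triangular plus clear at every lower pivot column
def pvRREF (M : Nat) (basis : List Int) : Prop :=
  pvInv M basis ∧ ∀ k, k < M → basis.getD k 0 ≠ 0 →
    ∀ j, j < k → basis.getD j 0 ≠ 0 → pvBit (basis.getD k 0) j = false

-- the reduction combination: xor of the rows bA[j], j < n pivot with bit j of v set
def pvS (bA : List Int) (v : Int) (n : Nat) : Int :=
  (List.range n).foldl
    (fun acc j => if bA.getD j 0 ≠ 0 ∧ pvBit v j then PySem.Int.bxor acc (bA.getD j 0) else acc) 0

-- the joint invariant between A's maintained RREF array bA and B's triangular array bB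
def pvJoint (M : Nat) (bA bB : List Int) : Prop :=
  pvRREF M bA ∧ pvInv M bB ∧
  ∀ k, k < M → ((bA.getD k 0 = 0 ↔ bB.getD k 0 = 0) ∧
    (bB.getD k 0 ≠ 0 → bA.getD k 0 = PySem.Int.bxor (bB.getD k 0) (pvS bA (bB.getD k 0) k)))

theorem pvReduceB_bit_high (M : Nat) (basis : List Int) (hInv : pvInv M basis) :
    ∀ n, n ≤ M → ∀ x t, n ≤ t → t < M →
      pvBit (pvReduceB basis x (List.range n).reverse) t = pvBit x t := by
  intro n
  induction n with
  | zero => intro _ x t _ _; simp [pvReduceB]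
  | succ n ih =>
      intro hnM x t hnt htM
      rw [pvRangeRev_succ, pvReduceB]
      by_cases hb : pvBit x n = true ∧ basis.getD n 0 ≠ 0
      · have hcond : (pvBit x n && (basis.getD n 0 != 0)) = true :=
          (pvAndCond _ _).mpr ⟨hb.1, hb.2⟩
        rw [hcond]
        simp only [if_true]
        rw [ih (by omega) _ t (by omega) htM, pvBit_bxor]
        have hb0 : pvBit (basis.getD n 0) t = false :=
          (hInv.2 n (by omega) hb.2).2 t (by omega) htM
        rw [hb0, Bool.xor_false]
      · have hcond : (pvBit x n && (basis.getD n 0 != 0)) = false := by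
          rw [Bool.eq_false_iff]
          intro hc
          exact hb ((pvAndCond _ _).mp hc)
        rw [hcond]
        simp only [Bool.false_eq_true, if_false]
        exact ih (by omega) x t (by omega) htM

-- A's low-bit cleanup equals the plain reduction when the two lists agree below the scanned indices
theorem pvLowA_eq_reduceB (basis b1 : List Int) :
    ∀ n, (∀ j, j < n → b1.getD j 0 = basis.getD j 0) →
      ∀ x, pvLowA b1 x (List.range n).reverse = pvReduceB basis x (List.range n).reverse := by
  intro n
  induction n with
  | zero => intro _ x; rfl
  | succ n ih =>
      intro hag x
      rw [pvRangeRev_succ, pvLowA, pvReduceB]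
      have hbn : b1.getD n 0 = basis.getD n 0 := hag n (by omega)
      by_cases hx : pvBit x n = true
      · by_cases hz : basis.getD n 0 = 0
        · have hc : (pvBit x n && (basis.getD n 0 != 0)) = false := by
            rw [Bool.eq_false_iff]
            intro hcc
            exact ((pvAndCond _ _).mp hcc).2 hz
          rw [hc]
          simp only [if_pos hx, hbn, hz, pvBxor_zero]
          exact ih (fun j hj => hag j (by omega)) x
        · have hc : (pvBit x n && (basis.getD n 0 != 0)) = true := (pvAndCond _ _).mpr ⟨hx, hz⟩
          rw [hc]
          simp only [if_pos hx, if_true, hbn]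
          exact ih (fun j hj => hag j (by omega)) _
      · have hx' : pvBit x n = false := by revert hx; cases pvBit x n <;> simp
        have hc : (pvBit x n && (basis.getD n 0 != 0)) = false := by
          rw [hx', Bool.false_and]
        rw [hc]
        simp only [if_neg (by simp [hx'] : ¬ pvBit x n = true)]
        exact ih (fun j hj => hag j (by omega)) x

-- find-the-pivot helper used only to state and prove the per-element characterisation
def pvFindP : Int → Int → List Nat → Int
  | p, _, [] => p
  | p, x, i :: rest => pvFindP (if pvBit x i then (i : Int) else p) x rest

theorem pvFindP_append (x : Int) (L1 L2 : List Nat) (p : Int) :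
    pvFindP p x (L1 ++ L2) = pvFindP (pvFindP p x L1) x L2 := by
  induction L1 generalizing p with
  | nil => rfl
  | cons i rest ih => simp [pvFindP, ih]

theorem pvFindP_succ (x : Int) (n : Nat) (p : Int) :
    pvFindP p x (List.range (n + 1)) = if pvBit x n then (n : Int) else pvFindP p x (List.range n) := by
  rw [List.range_succ, pvFindP_append]
  simp [pvFindP]

theorem pvFindP_spec (x : Int) (n : Nat) :
    (pvFindP (-1) x (List.range n) = -1 ∧ ∀ i, i < n → pvBit x i = false) ∨
    (∃ i, i < n ∧ pvFindP (-1) x (List.range n) = (i : Int) ∧ pvBit x i = true ∧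
      ∀ j, i < j → j < n → pvBit x j = false) := by
  induction n with
  | zero => left; exact ⟨rfl, fun i hi => absurd hi (by omega)⟩
  | succ n ih =>
      rw [pvFindP_succ]
      by_cases hx : pvBit x n = true
      · right
        exact ⟨n, by omega, by simp [hx], hx, fun j h1 h2 => absurd h2 (by omega)⟩
      · have hx' : pvBit x n = false := by revert hx; cases pvBit x n <;> simp
        rcases ih with ⟨h1, h2⟩ | ⟨i, hi, heq, hbit, hhigh⟩
        · left
          refine ⟨by simp [hx', h1], fun i hi => ?_⟩
          by_cases h : i = n
          · exact h ▸ hx'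
          · exact h2 i (by omega)
        · right
          refine ⟨i, by omega, by simp [hx', heq], hbit, fun j hj1 hj2 => ?_⟩
          by_cases h : j = n
          · exact h ▸ hx'
          · exact hhigh j hj1 (by omega)

theorem pvHighClear_length (i : Nat) (b : List Int) (L : List Nat) :
    (pvHighClear i b L).length = b.length := by
  induction L generalizing b with
  | nil => rfl
  | cons j rest ih =>
      rw [pvHighClear]
      split
      · rw [ih]; simp
      · exact ih b

-- pointwise description of A's pivot-clearing sweep
theorem pvHighClear_getD (i : Nat) (L : List Nat) (b : List Int)
    (hnd : L.Nodup) (hi : i ∉ L) (t : Nat) :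
    (pvHighClear i b L).getD t 0 =
      if t ∈ L ∧ pvBit (b.getD t 0) i = true
      then PySem.Int.bxor (b.getD t 0) (b.getD i 0) else b.getD t 0 := by
  induction L generalizing b with
  | nil => simp [pvHighClear]
  | cons j rest ih =>
      have hndr : rest.Nodup := hnd.of_cons
      have hjr : j ∉ rest := (List.nodup_cons.mp hnd).1
      have hir : i ∉ rest := fun h => hi (List.mem_cons_of_mem _ h)
      have hij : i ≠ j := fun h => hi (h ▸ List.mem_cons_self)
      rw [pvHighClear]
      by_cases hbj : pvBit (b.getD j 0) i = true
      · rw [if_pos hbj]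
        set b' := b.set j (PySem.Int.bxor (b.getD j 0) (b.getD i 0)) with hb'
        have hbi' : b'.getD i 0 = b.getD i 0 := pvGetD_set_ne _ _ _ _ (fun h => hij h.symm)
        have hbt' : ∀ s, s ≠ j → b'.getD s 0 = b.getD s 0 := fun s hs =>
          pvGetD_set_ne _ _ _ _ (fun h => hs h.symm)
        rw [ih b' hndr hir]
        by_cases htj : t = j
        · subst htj
          have hl : t < b.length := by
            by_contra hl
            have h0 : b.getD t 0 = 0 := by
              simp [List.getD, List.getElem?_eq_none (by omega : b.length ≤ t)]
            rw [h0, pvBit_zero] at hbj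
            exact absurd hbj (by simp)
          have hb't : b'.getD t 0 = PySem.Int.bxor (b.getD t 0) (b.getD i 0) :=
            pvGetD_set_self _ _ _ hl
          rw [if_neg (fun hc => hjr hc.1), hb't,
            if_pos ⟨List.mem_cons_self, hbj⟩]
        · have ht' : b'.getD t 0 = b.getD t 0 := hbt' t htj
          rw [ht', hbi']
          by_cases hc : t ∈ rest ∧ pvBit (b.getD t 0) i = true
          · rw [if_pos hc, if_pos ⟨List.mem_cons_of_mem _ hc.1, hc.2⟩]
          · rw [if_neg hc,
              if_neg (fun hc2 => hc ⟨(List.mem_cons.mp hc2.1).resolve_left htj, hc2.2⟩)]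
      · rw [if_neg hbj, ih b hndr hir]
        by_cases htj : t = j
        · subst htj
          rw [if_neg (fun hc => hjr hc.1), if_neg (fun hc => hbj hc.2)]
        · by_cases hc : t ∈ rest ∧ pvBit (b.getD t 0) i = true
          · rw [if_pos hc, if_pos ⟨List.mem_cons_of_mem _ hc.1, hc.2⟩]
          · rw [if_neg hc,
              if_neg (fun hc2 => hc ⟨(List.mem_cons.mp hc2.1).resolve_left htj, hc2.2⟩)]

-- the per-element equality: A's scan (with inline eliminations) in closed form
theorem pvScanA_eq (M : Nat) :
    ∀ n, n ≤ M → ∀ basis x, pvInv M basis →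
      (∀ j, n ≤ j → j < M → pvBit x j = false) →
      pvScanA M basis x (List.range n).reverse =
        (if 0 ≤ pvFindP (-1) (pvReduceB basis x (List.range n).reverse) (List.range n) then
          pvHighClear
            (pvFindP (-1) (pvReduceB basis x (List.range n).reverse) (List.range n)).toNat
            (basis.set
              (pvFindP (-1) (pvReduceB basis x (List.range n).reverse) (List.range n)).toNat
              (pvReduceB basis x (List.range n).reverse))
            (List.range'
              ((pvFindP (-1) (pvReduceB basis x (List.range n).reverse) (List.range n)).toNat + 1)
              (M - ((pvFindP (-1) (pvReduceB basis x (List.range n).reverse) (List.range n)).toNat + 1)))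
        else basis) := by
  intro n
  induction n with
  | zero =>
      intro _ basis x _ _
      show pvScanA M basis x [] = if (0:Int) ≤ -1 then _ else basis
      rw [pvScanA, if_neg (by norm_num)]
  | succ n ih =>
      intro hnM basis x hInv hhigh
      have hnM' : n < M := by omega
      rw [pvRangeRev_succ, pvScanA]
      by_cases hx : pvBit x n = true
      · by_cases hz : basis.getD n 0 = 0
        · -- insert at pivot n
          rw [if_pos hx, if_neg (by simpa using hz)]
          have hlen : basis.length = M := hInv.1
          have hb1n : (basis.set n x).getD n 0 = x := pvGetD_set_self _ _ _ (by omega)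
          have hag : ∀ j, j < n → (basis.set n x).getD j 0 = basis.getD j 0 :=
            fun j hj => pvGetD_set_ne _ _ _ _ (by omega)
          have hv : pvLowA (basis.set n x) ((basis.set n x).getD n 0) (List.range n).reverse =
              pvReduceB basis x (List.range n).reverse := by
            rw [hb1n]; exact pvLowA_eq_reduceB basis _ n hag x
          have hr1 : pvReduceB basis x (n :: (List.range n).reverse) =
              pvReduceB basis x ((List.range n).reverse) := by
            rw [pvReduceB]
            have hc : (pvBit x n && (basis.getD n 0 != 0)) = false := by
              rw [hz]; simp
            rw [hc]
            simp only [Bool.false_eq_true, if_false]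
          have hbitr : pvBit (pvReduceB basis x (List.range n).reverse) n = pvBit x n :=
            pvReduceB_bit_high M basis hInv n (by omega) x n (le_refl n) hnM'
          have hp : pvFindP (-1) (pvReduceB basis x (n :: (List.range n).reverse)) (List.range (n+1)) = (n : Int) := by
            rw [hr1, pvFindP_succ, if_pos (by rw [hbitr]; exact hx)]
          rw [hp, hr1, if_pos (by positivity)]
          rw [Int.toNat_natCast]
          show pvHighClear n
              ((basis.set n x).set n
                (pvLowA (basis.set n x) ((basis.set n x).getD n 0) (List.range n).reverse))
              (List.range' (n + 1) (M - (n + 1))) = _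
          rw [hv, List.set_set]
        · -- pivot n occupied: continue scanning with x ^ basis[n]
          rw [if_pos hx, if_pos (by simpa using hz)]
          have hxn : pvBit (basis.getD n 0) n = true := (hInv.2 n hnM' hz).1
          have hxh : ∀ j, n < j → j < M → pvBit (basis.getD n 0) j = false :=
            (hInv.2 n hnM' hz).2
          have hhigh' : ∀ j, n ≤ j → j < M → pvBit (PySem.Int.bxor x (basis.getD n 0)) j = false := by
            intro j h1 h2
            rw [pvBit_bxor]
            by_cases hjn : j = n
            · subst hjn; rw [hx, hxn]; rfl
            · rw [hhigh j (by omega) h2, hxh j (by omega) h2]; rfl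
          have := ih (by omega) basis (PySem.Int.bxor x (basis.getD n 0)) hInv
            (fun j h1 h2 => hhigh' j (by omega) h2)
          rw [this]
          have hr1 : pvReduceB basis x (n :: (List.range n).reverse) =
              pvReduceB basis (PySem.Int.bxor x (basis.getD n 0)) ((List.range n).reverse) := by
            rw [pvReduceB]
            have hc : (pvBit x n && (basis.getD n 0 != 0)) = true := (pvAndCond _ _).mpr ⟨hx, hz⟩
            rw [hc]
            simp only [if_true]
          have hbitr : pvBit (pvReduceB basis (PySem.Int.bxor x (basis.getD n 0)) (List.range n).reverse) n = false := by
            rw [pvReduceB_bit_high M basis hInv n (by omega) _ n (le_refl n) hnM']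
            exact hhigh' n (le_refl n) hnM'
          have hp : pvFindP (-1) (pvReduceB basis x (n :: (List.range n).reverse)) (List.range (n+1)) =
              pvFindP (-1) (pvReduceB basis (PySem.Int.bxor x (basis.getD n 0)) ((List.range n).reverse)) (List.range n) := by
            rw [hr1, pvFindP_succ, if_neg (by rw [hbitr]; simp)]
          rw [hp, hr1]
      · -- bit n of x clear: skip index n entirely
        have hx' : pvBit x n = false := by revert hx; cases pvBit x n <;> simp
        rw [if_neg hx]
        have := ih (by omega) basis x hInv
          (fun j h1 h2 => by
            by_cases hjn : j = n
            · exact hjn ▸ hx'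
            · exact hhigh j (by omega) h2)
        rw [this]
        have hr1 : pvReduceB basis x (n :: (List.range n).reverse) =
            pvReduceB basis x ((List.range n).reverse) := by
          rw [pvReduceB]
          have hc : (pvBit x n && (basis.getD n 0 != 0)) = false := by
            rw [hx', Bool.false_and]
          rw [hc]
          simp only [Bool.false_eq_true, if_false]
        have hbitr : pvBit (pvReduceB basis x (List.range n).reverse) n = false := by
          rw [pvReduceB_bit_high M basis hInv n (by omega) x n (le_refl n) hnM']
          exact hx'
        have hp : pvFindP (-1) (pvReduceB basis x (n :: (List.range n).reverse)) (List.range (n+1)) =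
            pvFindP (-1) (pvReduceB basis x ((List.range n).reverse)) (List.range n) := by
          rw [hr1, pvFindP_succ, if_neg (by rw [hbitr]; simp)]
        rw [hp, hr1]

-- ---------- pvS basics ----------

theorem pvS_succ (bA : List Int) (v : Int) (n : Nat) :
    pvS bA v (n + 1) =
      if bA.getD n 0 ≠ 0 ∧ pvBit v n then PySem.Int.bxor (pvS bA v n) (bA.getD n 0)
      else pvS bA v n := by
  rw [pvS, pvS, List.range_succ, List.foldl_append, List.foldl_cons, List.foldl_nil]

theorem pvS_zero (bA : List Int) (v : Int) : pvS bA v 0 = 0 := rfl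

theorem pvBxor_right_comm (a b c : Int) :
    PySem.Int.bxor (PySem.Int.bxor a b) c = PySem.Int.bxor (PySem.Int.bxor a c) b := by
  rw [pvBxor_assoc, pvBxor_comm b c, ← pvBxor_assoc]

theorem pvBxor_mix (a b c d : Int) :
    PySem.Int.bxor (PySem.Int.bxor a b) (PySem.Int.bxor c d) =
      PySem.Int.bxor (PySem.Int.bxor a c) (PySem.Int.bxor b d) := by
  rw [← pvBxor_assoc, ← pvBxor_assoc]
  rw [pvBxor_right_comm a b c]

theorem pvS_congr_bits (bA : List Int) (u v : Int) :
    ∀ n, (∀ j, j < n → bA.getD j 0 ≠ 0 → pvBit u j = pvBit v j) → pvS bA u n = pvS bA v n := by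
  intro n
  induction n with
  | zero => intro _; rfl
  | succ n ih =>
      intro h
      rw [pvS_succ, pvS_succ, ih (fun j hj => h j (by omega))]
      by_cases hz : bA.getD n 0 ≠ 0
      · rw [h n (by omega) hz]
      · rw [if_neg (fun hc => hz hc.1), if_neg (fun hc => hz hc.1)]

theorem pvS_congr_rows (bA bA' : List Int) (v : Int) :
    ∀ n, (∀ j, j < n → bA'.getD j 0 = bA.getD j 0) → pvS bA' v n = pvS bA v n := by
  intro n
  induction n with
  | zero => intro _; rfl
  | succ n ih =>
      intro h
      rw [pvS_succ, pvS_succ, ih (fun j hj => h j (by omega)), h n (by omega)]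

theorem pvS_high_eq (bA : List Int) (v : Int) :
    ∀ i n, i ≤ n → (∀ j, i ≤ j → j < n → bA.getD j 0 ≠ 0 → pvBit v j = false) →
      pvS bA v n = pvS bA v i := by
  intro i n
  induction n with
  | zero =>
      intro h _
      have : i = 0 := by omega
      subst this; rfl
  | succ n ih =>
      intro h hh
      by_cases hin : i = n + 1
      · subst hin; rfl
      · rw [pvS_succ]
        have hc : ¬ (bA.getD n 0 ≠ 0 ∧ pvBit v n = true) := by
          rintro ⟨h1, h2⟩
          rw [hh n (by omega) (by omega) h1] at h2
          exact absurd h2 (by simp)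
        rw [if_neg hc]
        exact ih (by omega) (fun j h1 h2 h3 => hh j h1 (by omega) h3)

theorem pvS_add (bA : List Int) (u v : Int) :
    ∀ n, pvS bA (PySem.Int.bxor u v) n = PySem.Int.bxor (pvS bA u n) (pvS bA v n) := by
  intro n
  induction n with
  | zero => rw [pvS_zero, pvS_zero, pvS_zero, pvBxor_zero]
  | succ n ih =>
      rw [pvS_succ, pvS_succ, pvS_succ, ih]
      by_cases hz : bA.getD n 0 ≠ 0
      · have hb := pvBit_bxor u v n
        cases hu : pvBit u n <;> cases hv : pvBit v n <;> rw [hu, hv] at hb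
        · rw [if_neg (by rintro ⟨_, hc⟩; rw [hb] at hc; simp at hc),
            if_neg (by simp), if_neg (by simp)]
        · rw [if_pos ⟨hz, by rw [hb]; rfl⟩, if_neg (by simp), if_pos ⟨hz, rfl⟩, ← pvBxor_assoc]
        · rw [if_pos ⟨hz, by rw [hb]; rfl⟩, if_pos ⟨hz, rfl⟩, if_neg (by simp),
            pvBxor_right_comm]
        · rw [if_neg (by rintro ⟨_, hc⟩; rw [hb] at hc; simp at hc),
            if_pos ⟨hz, rfl⟩, if_pos ⟨hz, rfl⟩, pvBxor_mix, pvBxor_self, pvBxor_zero]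
      · rw [if_neg (fun hc => hz hc.1), if_neg (fun hc => hz hc.1), if_neg (fun hc => hz hc.1)]

-- bit i of pvS when no row below n has bit i set
theorem pvBit_pvS_of_rows (bA : List Int) (v : Int) (i : Nat) :
    ∀ n, (∀ j, j < n → bA.getD j 0 ≠ 0 → pvBit (bA.getD j 0) i = false) →
      pvBit (pvS bA v n) i = false := by
  intro n
  induction n with
  | zero => intro _; rw [pvS_zero, pvBit_zero]
  | succ n ih =>
      intro h
      rw [pvS_succ]
      by_cases hc : bA.getD n 0 ≠ 0 ∧ pvBit v n = true
      · rw [if_pos hc, pvBit_bxor, ih (fun j hj => h j (by omega)), h n (by omega) hc.1]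
        rfl
      · rw [if_neg hc]
        exact ih (fun j hj => h j (by omega))

-- bit j (a pivot column) of pvS under the RREF invariant
theorem pvBit_pvS_pivot (M : Nat) (bA : List Int) (hR : pvRREF M bA) (v : Int) (j : Nat)
    (hjM : j < M) (hj : bA.getD j 0 ≠ 0) :
    ∀ n, n ≤ M → pvBit (pvS bA v n) j = (decide (j < n) && pvBit v j) := by
  intro n
  induction n with
  | zero => intro _; rw [pvS_zero, pvBit_zero]; simp
  | succ n ih =>
      intro hnM
      rw [pvS_succ]
      by_cases hc : bA.getD n 0 ≠ 0 ∧ pvBit v n = true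
      · rw [if_pos hc, pvBit_bxor, ih (by omega)]
        by_cases hnj : n = j
        · subst hnj
          have h1 : pvBit (bA.getD n 0) n = true := ((hR.1).2 n (by omega) hc.1).1
          rw [h1, hc.2]
          simp
        · have h1 : pvBit (bA.getD n 0) j = false := by
            rcases Nat.lt_or_ge n j with h | h
            · exact ((hR.1).2 n (by omega) hc.1).2 j h hjM
            · exact hR.2 n (by omega) hc.1 j (by omega) hj
          rw [h1, Bool.xor_false]
          have : decide (j < n + 1) = decide (j < n) := by
            simp only [decide_eq_decide]; omega
          rw [this]
      · rw [if_neg hc, ih (by omega)]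
        by_cases hnj : n = j
        · subst hnj
          have hv : pvBit v n = false := by
            rcases Bool.eq_false_or_eq_true (pvBit v n) with h | h
            · exact absurd ⟨hj, h⟩ hc
            · exact h
          rw [hv]
          simp
        · have : decide (j < n + 1) = decide (j < n) := by
            simp only [decide_eq_decide]; omega
          rw [this]

-- closed form of the descending reduction under the RREF invariant
theorem pvReduceB_eq_S (M : Nat) (bA : List Int) (hR : pvRREF M bA) :
    ∀ n, n ≤ M → ∀ x, pvReduceB bA x (List.range n).reverse = PySem.Int.bxor x (pvS bA x n) := by
  intro n
  induction n with
  | zero => intro _ x; rw [pvS_zero, pvBxor_zero]; rfl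
  | succ n ih =>
      intro hnM x
      rw [pvRangeRev_succ, pvReduceB, pvS_succ]
      by_cases hc : pvBit x n = true ∧ bA.getD n 0 ≠ 0
      · have hcond : (pvBit x n && (bA.getD n 0 != 0)) = true := (pvAndCond _ _).mpr hc
        rw [hcond]
        simp only [if_true]
        rw [if_pos ⟨hc.2, hc.1⟩, ih (by omega)]
        have hS : pvS bA (PySem.Int.bxor x (bA.getD n 0)) n = pvS bA x n := by
          apply pvS_congr_bits
          intro j hj hjz
          rw [pvBit_bxor, hR.2 n (by omega) hc.2 j hj hjz, Bool.xor_false]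
        rw [hS, ← pvBxor_assoc, pvBxor_right_comm]
      · have hcond : (pvBit x n && (bA.getD n 0 != 0)) = false := by
          rw [Bool.eq_false_iff]
          intro h
          exact hc ((pvAndCond _ _).mp h)
        rw [hcond]
        simp only [Bool.false_eq_true, if_false]
        rw [if_neg (by rintro ⟨h1, h2⟩; exact hc ⟨h2, h1⟩)]
        exact ih (by omega) x

-- the fully reduced value is clear at every pivot column
theorem pvR_clear_pivot (M : Nat) (bA : List Int) (hR : pvRREF M bA) (x : Int) (j : Nat)
    (hjM : j < M) (hj : bA.getD j 0 ≠ 0) :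
    pvBit (PySem.Int.bxor x (pvS bA x M)) j = false := by
  rw [pvBit_bxor, pvBit_pvS_pivot M bA hR x j hjM hj M (le_refl M), decide_eq_true hjM,
    Bool.true_and, Bool.xor_self]

-- F(bB[k]) = 0 : each triangular row fully reduces to zero against the linked RREF rows
theorem pvF_row_zero (M : Nat) (bA bB : List Int) (hJ : pvJoint M bA bB) (k : Nat)
    (hkM : k < M) (hk : bB.getD k 0 ≠ 0) :
    PySem.Int.bxor (bB.getD k 0) (pvS bA (bB.getD k 0) M) = 0 := by
  obtain ⟨hR, hInvB, hlink⟩ := hJ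
  have hkA : bA.getD k 0 ≠ 0 := fun h0 => hk (((hlink k hkM).1).mp h0)
  have hhi : ∀ j, k + 1 ≤ j → j < M → bA.getD j 0 ≠ 0 → pvBit (bB.getD k 0) j = false :=
    fun j h1 h2 _ => (hInvB.2 k hkM hk).2 j (by omega) h2
  rw [pvS_high_eq bA (bB.getD k 0) (k+1) M hkM hhi, pvS_succ,
    if_pos ⟨hkA, (hInvB.2 k hkM hk).1⟩, (hlink k hkM).2 hk, ← pvBxor_assoc]
  simp

-- ---------- the stage-1 scan, characterised through the joint invariant ----------

theorem pvScanT_zero (b : List Int) (L : List Nat) : pvScanT b 0 L = b := by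
  induction L with
  | nil => rfl
  | cons i rest ih => rw [pvScanT, pvBit_zero]; simpa using ih

theorem pvScanT_spec (M : Nat) (bA bB : List Int) (hJ : pvJoint M bA bB) (r : Int) :
    ∀ n, n ≤ M → ∀ x, (∀ j, n ≤ j → j < M → pvBit x j = pvBit r j) →
      PySem.Int.bxor x (pvS bA x M) = r →
      (pvFindP (-1) r (List.range n) = -1 → pvScanT bB x (List.range n).reverse = bB) ∧
      (∀ p : Nat, pvFindP (-1) r (List.range n) = (p : Int) →
        ∃ t, pvScanT bB x (List.range n).reverse = bB.set p t ∧
          (∀ j, p ≤ j → j < M → pvBit t j = pvBit r j) ∧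
          PySem.Int.bxor t (pvS bA t M) = r ∧ bB.getD p 0 = 0 ∧ p < M) := by
  obtain ⟨hR, hInvB, hlink⟩ := hJ
  intro n
  induction n with
  | zero =>
      intro _ x _ _
      constructor
      · intro _; rfl
      · intro p hp
        exfalso
        have : (-1 : Int) = (p : Int) := hp
        omega
  | succ n ih =>
      intro hnM x hx h2
      have hnM' : n < M := by omega
      have hrpiv : ∀ j, j < M → bA.getD j 0 ≠ 0 → pvBit r j = false := by
        intro j h1 hjz
        rw [← h2]
        exact pvR_clear_pivot M bA hR x j h1 hjz
      have hSM : pvS bA x M = pvS bA x (n + 1) :=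
        pvS_high_eq bA x (n+1) M (by omega)
          (fun j hj1 hj2 hj3 => by rw [hx j (by omega) hj2]; exact hrpiv j hj2 hj3)
      have hbitSn : pvBit (pvS bA x n) n = false :=
        pvBit_pvS_of_rows bA x n n
          (fun j hj hz => ((hR.1).2 j (by omega) hz).2 n (by omega) hnM')
      rw [pvRangeRev_succ, pvScanT]
      cases cx : pvBit x n with
      | false =>
          have hrn : pvBit r n = false := by
            rw [← h2, pvBit_bxor, hSM, pvS_succ,
              if_neg (by rintro ⟨_, hc⟩; rw [cx] at hc; exact absurd hc (by simp)),
              cx, hbitSn]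
            rfl
          have hcoll : pvFindP (-1) r (List.range (n+1)) = pvFindP (-1) r (List.range n) := by
            rw [pvFindP_succ, if_neg (by rw [hrn]; simp)]
          rw [if_neg (fun hc => absurd hc (by simp)), hcoll]
          exact ih (by omega) x
            (fun j hj1 hj2 => by
              by_cases hjn : j = n
              · subst hjn; rw [cx, hrn]
              · exact hx j (by omega) hj2) h2
      | true =>
          rw [if_pos rfl]
          by_cases hz : bB.getD n 0 = 0
          · -- break: store x at the fresh pivot n
            have hzA : bA.getD n 0 = 0 := ((hlink n hnM').1).mpr hz
            have hrn : pvBit r n = true := by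
              rw [← h2, pvBit_bxor, hSM, pvS_succ,
                if_neg (by rintro ⟨hc, _⟩; exact hc hzA), cx, hbitSn]
              rfl
            have hfind : pvFindP (-1) r (List.range (n+1)) = (n : Int) := by
              rw [pvFindP_succ, if_pos hrn]
            rw [if_neg (fun h => h hz)]
            constructor
            · intro h; rw [hfind] at h; exact absurd h (by omega)
            · intro p hp
              rw [hfind] at hp
              have hpn : p = n := by omega
              subst hpn
              refine ⟨x, rfl, ?_, h2, hz, hnM'⟩
              intro j hj1 hj2
              by_cases hjn : j = p
              · subst hjn; rw [cx, hrn]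
              · exact hx j (by omega) hj2
          · -- occupied pivot: xor the stored triangular row in and continue
            have hzA : bA.getD n 0 ≠ 0 := fun h0 => hz (((hlink n hnM').1).mp h0)
            have hrn : pvBit r n = false := hrpiv n hnM' hzA
            have hcoll : pvFindP (-1) r (List.range (n+1)) = pvFindP (-1) r (List.range n) := by
              rw [pvFindP_succ, if_neg (by rw [hrn]; simp)]
            rw [if_pos hz, hcoll]
            have hrow := hInvB.2 n hnM' hz
            have hx' : ∀ j, n ≤ j → j < M →
                pvBit (PySem.Int.bxor x (bB.getD n 0)) j = pvBit r j := by
              intro j hj1 hj2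
              rw [pvBit_bxor]
              by_cases hjn : j = n
              · subst hjn; rw [cx, hrow.1, hrn]; rfl
              · rw [hx j (by omega) hj2, hrow.2 j (by omega) hj2, Bool.xor_false]
            have h2' : PySem.Int.bxor (PySem.Int.bxor x (bB.getD n 0))
                (pvS bA (PySem.Int.bxor x (bB.getD n 0)) M) = r := by
              rw [pvS_add, pvBxor_mix, h2,
                pvF_row_zero M bA bB ⟨hR, hInvB, hlink⟩ n hnM' hz, pvBxor_zero]
            exact ih (by omega) _ hx' h2'

-- ---------- joint-invariant preservation ----------

-- how pvS changes when the fresh pivot row r is installed at the empty position p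
-- and bit p is cleared from the higher rows
theorem pvS_update (M : Nat) (bA bA' : List Int) (r : Int) (p : Nat)
    (hpM : p < M) (hbAp : bA.getD p 0 = 0) (hA'p : bA'.getD p 0 = r) (hrne : r ≠ 0)
    (hInvA : pvInv M bA)
    (hrhigh : ∀ j, p < j → j < M → pvBit r j = false)
    (hrow : ∀ k, k ≠ p → bA'.getD k 0 =
      if (p < k ∧ k < M) ∧ pvBit (bA.getD k 0) p = true then PySem.Int.bxor (bA.getD k 0) r
      else bA.getD k 0) :
    ∀ n, p < n → n ≤ M → ∀ v,
      pvS bA' v n = PySem.Int.bxor (pvS bA v n)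
        (if xor (pvBit v p) (pvBit (pvS bA v n) p) then r else 0) := by
  intro n
  induction n with
  | zero => intro h _ _; exact absurd h (by omega)
  | succ n ihn =>
      intro hpn hnM v
      by_cases hpn' : p < n
      · -- inductive step above the new pivot
        have hnp : n ≠ p := by omega
        have hnM' : n < M := by omega
        have IH := ihn hpn' (by omega) v
        rw [pvS_succ, pvS_succ]
        by_cases hcp : bA.getD n 0 ≠ 0 ∧ pvBit (bA.getD n 0) p = true
        · -- the row at n was modified: bA'[n] = bA[n] ^ r
          have h1 : bA'.getD n 0 = PySem.Int.bxor (bA.getD n 0) r := by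
            rw [hrow n hnp, if_pos ⟨⟨hpn', hnM'⟩, hcp.2⟩]
          have hne' : bA'.getD n 0 ≠ 0 := by
            apply pvBit_ne_zero _ n
            rw [h1, pvBit_bxor, (hInvA.2 n hnM' hcp.1).1, hrhigh n hpn' hnM']
            rfl
          by_cases hcv : pvBit v n = true
          · rw [if_pos ⟨hne', hcv⟩, if_pos ⟨hcp.1, hcv⟩, IH, h1]
            have hbS : pvBit (PySem.Int.bxor (pvS bA v n) (bA.getD n 0)) p =
                !(pvBit (pvS bA v n) p) := by
              rw [pvBit_bxor, hcp.2, Bool.xor_true]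
            rw [hbS]
            cases hg : xor (pvBit v p) (pvBit (pvS bA v n) p)
            · have : xor (pvBit v p) (!pvBit (pvS bA v n) p) = true := by
                revert hg; cases pvBit v p <;> cases pvBit (pvS bA v n) p <;> simp
              rw [this, if_neg (by simp), if_pos rfl, pvBxor_zero, ← pvBxor_assoc]
            · have : xor (pvBit v p) (!pvBit (pvS bA v n) p) = false := by
                revert hg; cases pvBit v p <;> cases pvBit (pvS bA v n) p <;> simp
              rw [this, if_pos rfl, if_neg (by simp), pvBxor_zero, pvBxor_mix, pvBxor_self,
                pvBxor_zero]
          · rw [if_neg (fun hc => hcv hc.2), if_neg (fun hc => hcv hc.2), IH]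
        · -- the row at n is unchanged: bA'[n] = bA[n]
          have h1 : bA'.getD n 0 = bA.getD n 0 := by
            rw [hrow n hnp, if_neg (fun hc => hcp ⟨by
              intro h0
              rw [h0, pvBit_zero] at hc
              exact absurd hc.2 (by simp), hc.2⟩)]
          have hbp0 : pvBit (bA.getD n 0) p = false := by
            rcases Bool.eq_false_or_eq_true (pvBit (bA.getD n 0) p) with h | h
            · exact absurd ⟨pvBit_ne_zero _ _ h, h⟩ hcp
            · exact h
          rw [h1]
          by_cases hc : bA.getD n 0 ≠ 0 ∧ pvBit v n = true
          · rw [if_pos hc, if_pos hc, IH]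
            have hbS : pvBit (PySem.Int.bxor (pvS bA v n) (bA.getD n 0)) p =
                pvBit (pvS bA v n) p := by
              rw [pvBit_bxor, hbp0, Bool.xor_false]
            rw [hbS, pvBxor_right_comm]
          · rw [if_neg hc, if_neg hc, IH]
      · -- base: n = p, the fresh pivot row enters the sum
        have hnp : n = p := by omega
        subst hnp
        have hS0 : pvS bA' v n = pvS bA v n :=
          pvS_congr_rows bA bA' v n (fun j hj => by
            rw [hrow j (by omega), if_neg (fun hc => absurd hc.1.1 (by omega))])
        have hSp : pvBit (pvS bA v n) n = false :=
          pvBit_pvS_of_rows bA v n n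
            (fun j hj hz => (hInvA.2 j (by omega) hz).2 n (by omega) (by omega))
        rw [pvS_succ, pvS_succ]
        cases hv : pvBit v n
        · rw [if_neg (by rintro ⟨_, hc⟩; exact absurd hc (by simp)),
            if_neg (by rintro ⟨_, hc⟩; exact absurd hc (by simp)), hS0, hSp,
            if_neg (by simp), pvBxor_zero]
        · rw [if_pos ⟨by rw [hA'p]; exact hrne, rfl⟩, if_neg (fun hc => hc.1 hbAp),
            hA'p, hS0, hSp]
          simp

-- installing the new pivot row preserves the joint invariant
theorem pvJoint_insert (M : Nat) (bA bB : List Int) (hR : pvRREF M bA) (hInvB : pvInv M bB)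
    (hlink : ∀ k, k < M → ((bA.getD k 0 = 0 ↔ bB.getD k 0 = 0) ∧
      (bB.getD k 0 ≠ 0 → bA.getD k 0 = PySem.Int.bxor (bB.getD k 0) (pvS bA (bB.getD k 0) k))))
    (r t : Int) (p : Nat) (hpM : p < M)
    (hbBp : bB.getD p 0 = 0)
    (hrp : pvBit r p = true)
    (hrhigh : ∀ j, p < j → j < M → pvBit r j = false)
    (hrpiv : ∀ j, j < M → bA.getD j 0 ≠ 0 → pvBit r j = false)
    (htbits : ∀ j, p ≤ j → j < M → pvBit t j = pvBit r j)
    (htF : PySem.Int.bxor t (pvS bA t M) = r) :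
    pvJoint M (pvHighClear p (bA.set p r) (List.range' (p+1) (M-(p+1)))) (bB.set p t) := by
  have hbAp : bA.getD p 0 = 0 := ((hlink p hpM).1).mpr hbBp
  have hlenA : bA.length = M := hR.1.1
  have hlenB : bB.length = M := hInvB.1
  have hrne : r ≠ 0 := pvBit_ne_zero r p hrp
  have htp : pvBit t p = true := by rw [htbits p (le_refl p) hpM]; exact hrp
  have htne : t ≠ 0 := pvBit_ne_zero t p htp
  set L := List.range' (p+1) (M-(p+1)) with hL
  have hmemL : ∀ s, s ∈ L ↔ p+1 ≤ s ∧ s < M := by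
    intro s; rw [hL, List.mem_range'_1]; omega
  have hnd : L.Nodup := List.nodup_range' 1 (by norm_num)
  have hpL : p ∉ L := fun h => by have := (hmemL p).mp h; omega
  set b1 := bA.set p r with hb1
  have hb1p : b1.getD p 0 = r := pvGetD_set_self _ _ _ (by omega)
  have hb1k : ∀ k, k ≠ p → b1.getD k 0 = bA.getD k 0 :=
    fun k hk => pvGetD_set_ne _ _ _ _ (fun h => hk h.symm)
  have hchar := pvHighClear_getD p L b1 hnd hpL
  set bA' := pvHighClear p b1 L with hbA'
  have hrowp : bA'.getD p 0 = r := by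
    rw [hbA', hchar p, if_neg (fun hc => hpL hc.1), hb1p]
  have hrow : ∀ k, k ≠ p → bA'.getD k 0 =
      if (p < k ∧ k < M) ∧ pvBit (bA.getD k 0) p = true then PySem.Int.bxor (bA.getD k 0) r
      else bA.getD k 0 := by
    intro k hk
    rw [hbA', hchar k, hb1k k hk, hb1p]
    by_cases hin : k ∈ L ∧ pvBit (bA.getD k 0) p = true
    · rw [if_pos hin, if_pos ⟨by have := (hmemL k).mp hin.1; omega, hin.2⟩]
    · rw [if_neg hin, if_neg (fun hc =>
        hin ⟨(hmemL k).mpr ⟨by omega, hc.1.2⟩, hc.2⟩)]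
  have hlenA' : bA'.length = M := by
    rw [hbA', pvHighClear_length, hb1, List.length_set, hlenA]
  have hrowz : ∀ k, k < M → k ≠ p → (bA'.getD k 0 = 0 ↔ bA.getD k 0 = 0) := by
    intro k hk hkp
    rw [hrow k hkp]
    by_cases hc : (p < k ∧ k < M) ∧ pvBit (bA.getD k 0) p = true
    · rw [if_pos hc]
      have hAk : bA.getD k 0 ≠ 0 := pvBit_ne_zero _ _ hc.2
      have hne : PySem.Int.bxor (bA.getD k 0) r ≠ 0 := by
        apply pvBit_ne_zero _ k
        rw [pvBit_bxor, (hR.1.2 k hk hAk).1, hrhigh k hc.1.1 hk]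
        rfl
      exact ⟨fun h => absurd h hne, fun h => absurd h hAk⟩
    · rw [if_neg hc]
  have hInvA' : pvInv M bA' := by
    refine ⟨hlenA', ?_⟩
    intro k hk hne
    by_cases hkp : k = p
    · subst hkp
      rw [hrowp]
      exact ⟨hrp, fun j h1 h2 => hrhigh j h1 h2⟩
    · have hAk : bA.getD k 0 ≠ 0 := fun h0 => hne ((hrowz k hk hkp).mpr h0)
      rw [hrow k hkp]
      by_cases hc : (p < k ∧ k < M) ∧ pvBit (bA.getD k 0) p = true
      · rw [if_pos hc]
        obtain ⟨hbk, hhk⟩ := hR.1.2 k hk hAk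
        refine ⟨?_, ?_⟩
        · rw [pvBit_bxor, hbk, hrhigh k hc.1.1 hk]; rfl
        · intro j h1 h2
          rw [pvBit_bxor, hhk j h1 h2, hrhigh j (by omega) h2]; rfl
      · rw [if_neg hc]
        exact hR.1.2 k hk hAk
  have hRREF' : pvRREF M bA' := by
    refine ⟨hInvA', ?_⟩
    intro k hk hkne j hj hjne
    by_cases hkp : k = p
    · have hjp : j ≠ p := by omega
      have hAj : bA.getD j 0 ≠ 0 := fun h0 => hjne ((hrowz j (by omega) hjp).mpr h0)
      rw [hkp, hrowp]
      exact hrpiv j (by omega) hAj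
    · have hAk : bA.getD k 0 ≠ 0 := fun h0 => hkne ((hrowz k hk hkp).mpr h0)
      rw [hrow k hkp]
      by_cases hjp : j = p
      · subst hjp
        by_cases hc : (j < k ∧ k < M) ∧ pvBit (bA.getD k 0) j = true
        · rw [if_pos hc, pvBit_bxor, hc.2, hrp]; rfl
        · rw [if_neg hc]
          rcases Bool.eq_false_or_eq_true (pvBit (bA.getD k 0) j) with hb | hb
          · exact absurd ⟨⟨hj, hk⟩, hb⟩ hc
          · exact hb
      · have hAj : bA.getD j 0 ≠ 0 := fun h0 => hjne ((hrowz j (by omega) hjp).mpr h0)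
        have h1 : pvBit (bA.getD k 0) j = false := hR.2 k hk hAk j hj hAj
        have h2 : pvBit r j = false := hrpiv j (by omega) hAj
        by_cases hc : (p < k ∧ k < M) ∧ pvBit (bA.getD k 0) p = true
        · rw [if_pos hc, pvBit_bxor, h1, h2]; rfl
        · rw [if_neg hc]; exact h1
  have hInvB' : pvInv M (bB.set p t) := by
    refine ⟨by rw [List.length_set, hlenB], ?_⟩
    intro k hk hne
    by_cases hkp : k = p
    · subst hkp
      rw [pvGetD_set_self bB _ t (by omega)]
      exact ⟨htp, fun j h1 h2 => by rw [htbits j (by omega) h2]; exact hrhigh j h1 h2⟩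
    · rw [pvGetD_set_ne bB p k t (fun h => hkp h.symm)] at hne ⊢
      exact hInvB.2 k hk hne
  refine ⟨hRREF', hInvB', ?_⟩
  intro k hk
  by_cases hkp : k = p
  · subst hkp
    rw [hrowp, pvGetD_set_self bB _ t (by omega)]
    refine ⟨⟨fun h => absurd h hrne, fun h => absurd h htne⟩, fun _ => ?_⟩
    have hS1 : pvS bA' t k = pvS bA t k :=
      pvS_congr_rows bA bA' t k (fun j hj => by
        rw [hrow j (by omega), if_neg (fun hc => absurd hc.1.1 (by omega))])
    have hS2 : pvS bA t M = pvS bA t k :=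
      pvS_high_eq bA t k M (by omega) (fun j h1 h2 h3 => by
        by_cases hjk : j = k
        · subst hjk; exact absurd hbAp h3
        · rw [htbits j (by omega) h2]; exact hrpiv j h2 h3)
    rw [hS1, ← hS2, htF]
  · rw [pvGetD_set_ne bB p k t (fun h => hkp h.symm)]
    refine ⟨by rw [hrowz k hk hkp]; exact (hlink k hk).1, fun hkB => ?_⟩
    have hAk : bA.getD k 0 ≠ 0 := fun h0 => hkB (((hlink k hk).1).mp h0)
    have holnk := (hlink k hk).2 hkB
    rcases Nat.lt_or_ge k p with hkltp | hkgep
    · have h1 : bA'.getD k 0 = bA.getD k 0 := by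
        rw [hrow k hkp, if_neg (fun hc => absurd hc.1.1 (by omega))]
      have h2 : pvS bA' (bB.getD k 0) k = pvS bA (bB.getD k 0) k :=
        pvS_congr_rows _ _ _ k (fun j hj => by
          rw [hrow j (by omega), if_neg (fun hc => absurd hc.1.1 (by omega))])
      rw [h1, h2]
      exact holnk
    · have hpk : p < k := by omega
      have hupd := pvS_update M bA bA' r p hpM hbAp hrowp hrne hR.1 hrhigh hrow k hpk
        (by omega) (bB.getD k 0)
      rw [hupd]
      have hgam : pvBit (bA.getD k 0) p =
          xor (pvBit (bB.getD k 0) p) (pvBit (pvS bA (bB.getD k 0) k) p) := by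
        rw [holnk, pvBit_bxor]
      rw [hrow k hkp]
      by_cases hg : xor (pvBit (bB.getD k 0) p) (pvBit (pvS bA (bB.getD k 0) k) p) = true
      · rw [if_pos ⟨⟨hpk, hk⟩, by rw [hgam]; exact hg⟩, if_pos hg, holnk, pvBxor_assoc]
      · rw [if_neg (fun hc => by rw [hgam] at hc; exact hg hc.2), if_neg hg, pvBxor_zero]
        exact holnk

theorem pvJoint_step (M : Nat) (bA bB : List Int) (hJ : pvJoint M bA bB) (x : Int) :
    pvJoint M
      (if 0 ≤ pvFindP (-1) (pvReduceB bA x (List.range M).reverse) (List.range M) then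
        pvHighClear
          (pvFindP (-1) (pvReduceB bA x (List.range M).reverse) (List.range M)).toNat
          (bA.set
            (pvFindP (-1) (pvReduceB bA x (List.range M).reverse) (List.range M)).toNat
            (pvReduceB bA x (List.range M).reverse))
          (List.range'
            ((pvFindP (-1) (pvReduceB bA x (List.range M).reverse) (List.range M)).toNat + 1)
            (M - ((pvFindP (-1) (pvReduceB bA x (List.range M).reverse) (List.range M)).toNat + 1)))
      else bA)
      (pvScanT bB x (List.range M).reverse) := by
  obtain ⟨hR, hInvB, hlink⟩ := hJ
  have hr0 : pvReduceB bA x (List.range M).reverse = PySem.Int.bxor x (pvS bA x M) :=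
    pvReduceB_eq_S M bA hR M (le_refl M) x
  have hscan := pvScanT_spec M bA bB ⟨hR, hInvB, hlink⟩
    (pvReduceB bA x (List.range M).reverse) M (le_refl M) x
    (fun j hj1 hj2 => absurd hj2 (by omega)) hr0.symm
  rcases pvFindP_spec (pvReduceB bA x (List.range M).reverse) M with
    ⟨hm1, hlow⟩ | ⟨p, hpM, hfp, hbp, hhighp⟩
  · rw [hm1, if_neg (by norm_num), hscan.1 hm1]
    exact ⟨hR, hInvB, hlink⟩
  · obtain ⟨t, hts, htbits, htF, hbBp, _⟩ := hscan.2 p hfp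
    rw [hfp, if_pos (by positivity), Int.toNat_natCast, hts]
    exact pvJoint_insert M bA bB hR hInvB hlink _ t p hpM hbBp hbp
      (fun j h1 h2 => hhighp j h1 h2)
      (fun j h1 h2 => by rw [hr0]; exact pvR_clear_pivot M bA hR x j h1 h2)
      htbits htF

theorem pvGetD_replicate (M k : Nat) : (List.replicate M (0:Int)).getD k 0 = 0 := by
  rcases Nat.lt_or_ge k M with h | h
  · simp [List.getD, h]
  · simp [List.getD, List.getElem?_eq_none (by simpa using h : (List.replicate M (0:Int)).length ≤ k)]

theorem pvJoint_replicate (M : Nat) : pvJoint M (List.replicate M 0) (List.replicate M 0) := by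
  refine ⟨⟨⟨by simp, fun k hk hne => absurd (pvGetD_replicate M k) hne⟩,
    fun k hk hne => absurd (pvGetD_replicate M k) hne⟩,
    ⟨by simp, fun k hk hne => absurd (pvGetD_replicate M k) hne⟩,
    fun k hk => ⟨by rw [pvGetD_replicate], fun hne => absurd (pvGetD_replicate M k) hne⟩⟩

theorem pvFold_joint (M : Nat) (l : List Int) :
    ∀ bA bB, pvJoint M bA bB →
      pvJoint M
        (l.foldl (fun b x => if x == 0 then b else pvScanA M b x (List.range M).reverse) bA)
        (l.foldl (fun b x => pvScanT b x (List.range M).reverse) bB) := by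
  induction l with
  | nil => intro bA bB hJ; exact hJ
  | cons x l ih =>
      intro bA bB hJ
      simp only [List.foldl_cons]
      by_cases hx0 : x = 0
      · subst hx0
        rw [if_pos (by simp), pvScanT_zero]
        exact ih bA bB hJ
      · rw [if_neg (by simpa using hx0),
          pvScanA_eq M M (le_refl M) bA x hJ.1.1 (fun j h1 h2 => absurd h2 (by omega))]
        exact ih _ _ (pvJoint_step M bA bB hJ x)

-- ---------- stage 2: the sweep turns the triangular array into the RREF array ----------

theorem pvReduceB_congr_rows (b c : List Int) :
    ∀ n, (∀ j, j < n → c.getD j 0 = b.getD j 0) →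
      ∀ x, pvReduceB c x (List.range n).reverse = pvReduceB b x (List.range n).reverse := by
  intro n
  induction n with
  | zero => intro _ x; rfl
  | succ n ih =>
      intro h x
      rw [pvRangeRev_succ, pvReduceB, pvReduceB, h n (by omega)]
      exact ih (fun j hj => h j (by omega)) _

theorem pvGetD_eq_getElem (l : List Int) (n : Nat) (h : n < l.length) : l.getD n 0 = l[n] := by
  simp [List.getD, List.getElem?_eq_getElem h]

theorem pvSweep_go (M : Nat) (bA bB : List Int) (hJ : pvJoint M bA bB) :
    ∀ k i c, i ≤ M → M - i = k → c.length = M →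
      (∀ t, t < i → c.getD t 0 = bA.getD t 0) →
      (∀ t, i ≤ t → c.getD t 0 = bB.getD t 0) →
      pvSweep c (List.range' i k) = bA := by
  obtain ⟨hR, hInvB, hlink⟩ := hJ
  intro k
  induction k with
  | zero =>
      intro i c hiM hk hlen hlow hhigh
      have hiM' : i = M := by omega
      subst hiM'
      show c = bA
      apply List.ext_getElem (by rw [hlen, hR.1.1])
      intro n h1 h2
      rw [← pvGetD_eq_getElem c n h1, ← pvGetD_eq_getElem bA n h2]
      exact hlow n (by omega)
  | succ k ihk =>
      intro i c hiM hk hlen hlow hhigh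
      have hiM' : i < M := by omega
      rw [List.range'_succ, pvSweep]
      have hci : c.getD i 0 = bB.getD i 0 := hhigh i (le_refl i)
      by_cases hz : bB.getD i 0 = 0
      · rw [if_neg (by rw [hci, hz]; simp)]
        refine ihk (i+1) c (by omega) (by omega) hlen ?_ ?_
        · intro t ht
          by_cases hti : t = i
          · subst hti
            rw [hci, hz, ((hlink t hiM').1).mpr hz]
          · exact hlow t (by omega)
        · intro t ht; exact hhigh t (by omega)
      · have hcz : c.getD i 0 ≠ 0 := by rw [hci]; exact hz
        rw [if_pos hcz]
        have hred : pvReduceB c (c.getD i 0) (List.range i).reverse = bA.getD i 0 := by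
          rw [hci, pvReduceB_congr_rows bA c i (fun j hj => hlow j hj) (bB.getD i 0),
            pvReduceB_eq_S M bA hR i (by omega)]
          exact ((hlink i hiM').2 hz).symm
        rw [hred]
        refine ihk (i+1) (c.set i (bA.getD i 0)) (by omega) (by omega)
          (by rw [List.length_set, hlen]) ?_ ?_
        · intro t ht
          by_cases hti : t = i
          · subst hti
            exact pvGetD_set_self c t _ (by omega)
          · rw [pvGetD_set_ne c i t _ (fun h => hti h.symm)]
            exact hlow t (by omega)
        · intro t ht
          rw [pvGetD_set_ne c i t _ (by omega)]
          exact hhigh t (by omega)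

theorem pvSweep_eq (M : Nat) (bA bB : List Int) (hJ : pvJoint M bA bB) :
    pvSweep bB (List.range M) = bA := by
  rw [List.range_eq_range']
  exact pvSweep_go M bA bB hJ M 0 bB (by omega) (by omega) hJ.2.1.1
    (fun t ht => absurd ht (by omega)) (fun t _ => rfl)

-- ===== VERDICT (by name: the statement is the Claim_ definition above) =====
theorem build_linear_basis_spec : Claim_equal_build_linear_basis := by
  intro a_list m _
  unfold Spec_build_linear_basis build_linear_basis build_linear_basis_alt
  dsimp only
  rw [pvSweep_eq m.toNat _ _ (pvFold_joint m.toNat a_list _ _ (pvJoint_replicate m.toNat))]
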